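-- pv_equiv track=rewrite | github.com/Lemonn-n/AC2021 | 2015/solusions/s1-s7.py | nice_cnt2
-- ===== SOURCE A (Python) =====
-- def nice_cnt2(f):
--     nice_cnt = 0
--     for fi in f:
--         c1 = any([any([fi[i:i+2]==fi[j:j+2] for j in range(i+2, len(fi)-1)]) for i in range(len(fi)-1)])
--         c2 = any([fi[i]==fi[i-2] for i in range(2, len(fi))])
--         if c1 and c2:
--             nice_cnt += 1
--     return nice_cnt
-- ===== SOURCE B (Python) =====
-- def nice_cnt2(f):
--     count = 0
--     for s in f:
--         # c1: a pair of two letters that appears twice without overlapping,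
--         # via a single pass recording the first index of each pair.
--         first = {}
--         c1 = False
--         for i in range(len(s) - 1):
--             p = s[i:i+2]
--             if p in first:
--                 if i - first[p] >= 2:
--                     c1 = True
--             else:
--                 first[p] = i
--         # c2: a letter repeating with exactly one letter between.
--         c2 = any(a == b for a, b in zip(s, s[2:]))
--         if c1 and c2:
--             count += 1
--     return count
-- ===== Notes on version B (the rewrite author's own statement) =====
-- stated objective: faster
-- what changed: The quadratic nested scan for a repeated non-overlapping pair is replaced by a single pass per string that records each pair's first index in a dict, and the spaced-repeat check is done with zip instead of index arithmetic.
import Mathlib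
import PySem

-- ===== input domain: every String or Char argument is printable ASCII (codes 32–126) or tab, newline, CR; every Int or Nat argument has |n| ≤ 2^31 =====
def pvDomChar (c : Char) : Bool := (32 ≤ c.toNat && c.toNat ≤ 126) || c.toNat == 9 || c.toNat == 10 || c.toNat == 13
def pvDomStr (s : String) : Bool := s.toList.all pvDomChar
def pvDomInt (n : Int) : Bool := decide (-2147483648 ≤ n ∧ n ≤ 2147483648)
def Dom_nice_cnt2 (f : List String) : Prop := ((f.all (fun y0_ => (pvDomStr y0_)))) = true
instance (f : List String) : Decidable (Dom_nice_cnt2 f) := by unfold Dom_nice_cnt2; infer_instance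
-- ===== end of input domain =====

-- B replaces A's nested scan for a repeated non-overlapping pair by a single pass per
-- string recording each pair's first index in a dict (objective: faster).

-- ===== PORT A =====
def nice_cnt2 (f : List String) : Int :=
  f.foldl (fun nice_cnt fi =>
    let c1 := ((PySem.List.pyRange 0 (PySem.Str.len fi - 1)).map (fun i =>
        ((PySem.List.pyRange (i + 2) (PySem.Str.len fi - 1)).map (fun j =>
            PySem.Str.slice fi (some i) (some (i + 2)) ==
              PySem.Str.slice fi (some j) (some (j + 2)))).any id)).any id
    let c2 := ((PySem.List.pyRange 2 (PySem.Str.len fi)).map (fun i =>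
        PySem.Str.pyGet? fi i == PySem.Str.pyGet? fi (i - 2))).any id
    if c1 && c2 then nice_cnt + 1 else nice_cnt) 0

-- ===== PORT B =====
-- the body of B's inner 'for i in range(len(s) - 1)' loop: state = (first, c1)
def pvStep (s : String) : PySem.Dict String Int × Bool → Int → PySem.Dict String Int × Bool :=
  fun st i =>
    let p := PySem.Str.slice s (some i) (some (i + 2))
    match st.1.get? p with
    | some t => (st.1, st.2 || decide (2 ≤ i - t))
    | none => (st.1.insert p i, st.2)

def nice_cnt2_alt (f : List String) : Int :=
  f.foldl (fun count s =>
    let st := (PySem.List.pyRange 0 (PySem.Str.len s - 1)).foldl (pvStep s)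
      (PySem.Dict.empty, false)
    let c2 := (s.toList.zip (PySem.Str.slice s (some 2) none).toList).any
      (fun ab => ab.1 == ab.2)
    if st.2 && c2 then count + 1 else count) 0

-- ===== PRECONDITION & SPEC =====
def Spec_nice_cnt2 (f : List String) (out : Int) : Prop := out = nice_cnt2_alt f
instance (f : List String) (out : Int) : Decidable (Spec_nice_cnt2 f out) := by unfold Spec_nice_cnt2; infer_instance

-- ===== CLAIM (what is proved, stated in full; the proofs are below) =====
def Claim_equal_nice_cnt2 : Prop := ∀ (f : List String), Dom_nice_cnt2 f → Spec_nice_cnt2 f (nice_cnt2 f)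

-- ===== LEMMAS AND PROOFS =====

-- the pair starting at index a (as the Python slice s[a:a+2])
def pvPair (s : String) (a : Nat) : String :=
  PySem.Str.slice s (some (a : Int)) (some ((a : Int) + 2))

-- "some two-character pair occurs twice without overlapping"
def pvP1 (s : String) : Prop :=
  ∃ a b : Nat, a + 2 ≤ b ∧ b + 2 ≤ s.toList.length ∧ pvPair s a = pvPair s b

-- "some character repeats with exactly one character in between"
def pvP2 (s : String) : Prop :=
  ∃ k : Nat, k + 2 < s.toList.length ∧ s.toList[k]? = s.toList[k + 2]?

-- A's c1 computes pvP1
lemma c1A_iff (s : String) :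
    (((PySem.List.pyRange 0 (PySem.Str.len s - 1)).map (fun i =>
        ((PySem.List.pyRange (i + 2) (PySem.Str.len s - 1)).map (fun j =>
            PySem.Str.slice s (some i) (some (i + 2)) ==
              PySem.Str.slice s (some j) (some (j + 2)))).any id)).any id) = true ↔ pvP1 s := by
  simp only [List.any_map, List.any_eq_true, Function.comp, id, beq_iff_eq,
    PySem.List.mem_pyRange_one, PySem.Str.len_eq]
  constructor
  · rintro ⟨i, ⟨h0, hi⟩, j, ⟨hij, hj⟩, heq⟩
    obtain ⟨a, rfl⟩ : ∃ a : Nat, i = (a : Int) := ⟨i.toNat, by omega⟩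
    obtain ⟨b, rfl⟩ : ∃ b : Nat, j = (b : Int) := ⟨j.toNat, by omega⟩
    exact ⟨a, b, by omega, by omega, heq⟩
  · rintro ⟨a, b, hab, hb, heq⟩
    exact ⟨(a : Int), ⟨by omega, by omega⟩, (b : Int), ⟨by omega, by omega⟩, heq⟩

def pvInv (s : String) (m : Nat) (st : PySem.Dict String Int × Bool) : Prop :=
  (∀ p t, st.1.get? p = some t → ∃ a : Nat, t = (a : Int) ∧ a < m ∧ pvPair s a = p) ∧
  (∀ a : Nat, a < m → ∃ b : Nat, b ≤ a ∧ st.1.get? (pvPair s a) = some ((b : Int))) ∧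
  (st.2 = true ↔ ∃ a b : Nat, a + 2 ≤ b ∧ b < m ∧ pvPair s a = pvPair s b)

lemma pvInv_holds (s : String) (m : Nat) :
    pvInv s m ((PySem.List.pyRange 0 (m : Int)).foldl (pvStep s) (PySem.Dict.empty, false)) := by
  induction m with
  | zero =>
    rw [Nat.cast_zero, PySem.List.pyRange_one_eq_nil le_rfl]
    simp only [List.foldl_nil]
    refine ⟨?_, ?_, ?_⟩
    · intro p t h; rw [PySem.Dict.get?_empty] at h; exact absurd h (by simp)
    · intro a ha; omega
    · constructor
      · intro h; exact absurd h (by simp)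
      · rintro ⟨a, b, _, hb, _⟩; omega
  | succ m ih =>
    have hcast : ((m + 1 : Nat) : Int) = ((m : Nat) : Int) + 1 := by push_cast; ring
    rw [hcast, PySem.List.pyRange_one_succ_right (by positivity), List.foldl_append,
      List.foldl_cons, List.foldl_nil]
    set st := (PySem.List.pyRange 0 (m : Int)).foldl (pvStep s) (PySem.Dict.empty, false) with hst
    obtain ⟨I1, I2, I3⟩ := ih
    show pvInv s (m + 1) (pvStep s st (m : Int))
    rw [show pvStep s st (m : Int) = (match st.1.get? (pvPair s m) with
        | some t => (st.1, st.2 || decide (2 ≤ (m : Int) - t))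
        | none => (st.1.insert (pvPair s m) (m : Int), st.2)) from rfl]
    cases hg : st.1.get? (pvPair s m) with
    | some t =>
      refine ⟨?_, ?_, ?_⟩
      · intro p' t' h
        obtain ⟨a, rfl, ha, hpa⟩ := I1 p' t' h
        exact ⟨a, rfl, by omega, hpa⟩
      · intro a ha
        rcases Nat.lt_succ_iff_lt_or_eq.mp ha with h | rfl
        · exact I2 a h
        · obtain ⟨a', rfl, ha', hpa'⟩ := I1 _ _ hg
          exact ⟨a', by omega, hg⟩
      · constructor
        · intro h
          rcases Bool.or_eq_true_iff.mp h with h | h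
          · obtain ⟨a, b, hab, hb, hpab⟩ := I3.mp h
            exact ⟨a, b, hab, by omega, hpab⟩
          · obtain ⟨a', rfl, ha', hpa'⟩ := I1 _ _ hg
            have : 2 ≤ (m : Int) - (a' : Int) := of_decide_eq_true h
            exact ⟨a', m, by omega, by omega, hpa'⟩
        · rintro ⟨a, b, hab, hb, hpab⟩
          rcases Nat.lt_succ_iff_lt_or_eq.mp hb with h | rfl
          · exact Bool.or_eq_true_iff.mpr (Or.inl (I3.mpr ⟨a, b, hab, h, hpab⟩))
          · obtain ⟨b', hb', hget⟩ := I2 a (by omega)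
            rw [hpab] at hget
            rw [hg] at hget
            obtain rfl : t = (b' : Int) := by injection hget
            refine Bool.or_eq_true_iff.mpr (Or.inr (decide_eq_true ?_))
            omega
    | none =>
      refine ⟨?_, ?_, ?_⟩
      · intro p' t' h
        rw [PySem.Dict.get?_insert] at h
        split at h
        · rename_i hp
          obtain rfl : t' = (m : Int) := by injection h with hh; omega
          exact ⟨m, rfl, by omega, hp.symm⟩
        · obtain ⟨a, rfl, ha, hpa⟩ := I1 p' t' h
          exact ⟨a, rfl, by omega, hpa⟩
      · intro a ha
        rcases Nat.lt_succ_iff_lt_or_eq.mp ha with h | rfl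
        · obtain ⟨b, hb, hget⟩ := I2 a h
          refine ⟨b, hb, ?_⟩
          rw [PySem.Dict.get?_insert]
          split
          · rename_i hp
            rw [hp, hg] at hget
            exact absurd hget (by simp)
          · exact hget
        · refine ⟨a, le_rfl, ?_⟩
          rw [PySem.Dict.get?_insert, if_pos rfl]
      · constructor
        · intro h
          obtain ⟨a, b, hab, hb, hpab⟩ := I3.mp h
          exact ⟨a, b, hab, by omega, hpab⟩
        · rintro ⟨a, b, hab, hb, hpab⟩
          rcases Nat.lt_succ_iff_lt_or_eq.mp hb with h | rfl
          · exact I3.mpr ⟨a, b, hab, h, hpab⟩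
          · obtain ⟨b', hb', hget⟩ := I2 a (by omega)
            rw [hpab, hg] at hget
            exact absurd hget (by simp)


-- B's c1 computes pvP1
lemma c1B_iff (s : String) :
    ((PySem.List.pyRange 0 (PySem.Str.len s - 1)).foldl (pvStep s)
        (PySem.Dict.empty, false)).2 = true ↔ pvP1 s := by
  rw [PySem.Str.len_eq]
  by_cases h0 : s.toList.length = 0
  · rw [h0, PySem.List.pyRange_one_eq_nil (by omega)]
    simp only [List.foldl_nil]
    constructor
    · intro h; exact absurd h (by simp)
    · rintro ⟨a, b, _, hb, _⟩
      omega
  · have hL : ((s.toList.length : Int) - 1) = ((s.toList.length - 1 : Nat) : Int) := by omega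
    rw [hL]
    obtain ⟨_, _, I3⟩ := pvInv_holds s (s.toList.length - 1)
    rw [I3]
    constructor
    · rintro ⟨a, b, hab, hb, hp⟩; exact ⟨a, b, hab, by omega, hp⟩
    · rintro ⟨a, b, hab, hb, hp⟩; exact ⟨a, b, hab, by omega, hp⟩

-- A's c2 computes pvP2
lemma c2A_iff (s : String) :
    (((PySem.List.pyRange 2 (PySem.Str.len s)).map (fun i =>
        PySem.Str.pyGet? s i == PySem.Str.pyGet? s (i - 2))).any id) = true ↔ pvP2 s := by
  rw [List.any_map, List.any_eq_true]
  simp only [Function.comp, id, beq_iff_eq, PySem.List.mem_pyRange_one, PySem.Str.len_eq]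
  constructor
  · rintro ⟨i, ⟨h2, hlt⟩, heq⟩
    obtain ⟨k, rfl⟩ : ∃ k : Nat, i = ((k + 2 : Nat) : Int) := ⟨(i - 2).toNat, by omega⟩
    refine ⟨k, by omega, ?_⟩
    have h2' : ((k + 2 : Nat) : Int) - 2 = ((k : Nat) : Int) := by omega
    rw [PySem.Str.pyGet?_natCast, h2', PySem.Str.pyGet?_natCast] at heq
    exact heq.symm
  · rintro ⟨k, hk, heq⟩
    refine ⟨((k + 2 : Nat) : Int), ⟨by omega, by omega⟩, ?_⟩
    have h2' : ((k + 2 : Nat) : Int) - 2 = ((k : Nat) : Int) := by omega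
    rw [PySem.Str.pyGet?_natCast, h2', PySem.Str.pyGet?_natCast]
    exact heq.symm

-- B's c2 computes pvP2
lemma c2B_iff (s : String) :
    ((s.toList.zip (PySem.Str.slice s (some 2) none).toList).any
      (fun ab => ab.1 == ab.2)) = true ↔ pvP2 s := by
  have hdrop : (PySem.Str.slice s (some 2) none).toList = s.toList.drop 2 := by
    simp [pysem, PySem.Str.slice]
  rw [hdrop, List.any_eq_true]
  constructor
  · rintro ⟨⟨x, y⟩, hmem, heq⟩
    rw [List.mem_iff_getElem] at hmem
    obtain ⟨k, hk, hget⟩ := hmem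
    rw [List.length_zip, List.length_drop] at hk
    rw [List.getElem_zip] at hget
    have hklen : k + 2 < s.toList.length := by omega
    obtain ⟨hx, hy⟩ := Prod.mk.injEq .. ▸ hget
    simp only [beq_iff_eq] at heq
    have hxy : y = s.toList[k + 2]'hklen := by rw [← hy, List.getElem_drop]; congr 1; omega
    refine ⟨k, hklen, ?_⟩
    rw [List.getElem?_eq_getElem (by omega), List.getElem?_eq_getElem hklen]
    rw [hx, heq, hxy]
  · rintro ⟨k, hk, heq⟩
    have h1 : k < s.toList.length := by omega
    rw [List.getElem?_eq_getElem h1, List.getElem?_eq_getElem hk] at heq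
    have heq' : s.toList[k]'h1 = s.toList[k + 2]'hk := by injection heq
    have hd : k < (s.toList.drop 2).length := by rw [List.length_drop]; omega
    have hz : k < (s.toList.zip (s.toList.drop 2)).length := by rw [List.length_zip]; omega
    refine ⟨(s.toList[k]'h1, (s.toList.drop 2)[k]'hd), ?_, ?_⟩
    · rw [List.mem_iff_getElem]
      exact ⟨k, hz, List.getElem_zip⟩
    · show (s.toList[k]'h1 == (s.toList.drop 2)[k]'hd) = true
      rw [beq_iff_eq, List.getElem_drop]
      exact heq'.trans (getElem_congr (c := s.toList) rfl (show k + 2 = 2 + k by omega) hk)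

-- ===== VERDICT (by name: the statement is the Claim_ definition above) =====
theorem nice_cnt2_spec : Claim_equal_nice_cnt2 := by
  intro f _
  unfold Spec_nice_cnt2 nice_cnt2 nice_cnt2_alt
  congr 1
  funext c s
  rw [show (((PySem.List.pyRange 0 (PySem.Str.len s - 1)).map (fun i =>
        ((PySem.List.pyRange (i + 2) (PySem.Str.len s - 1)).map (fun j =>
            PySem.Str.slice s (some i) (some (i + 2)) ==
              PySem.Str.slice s (some j) (some (j + 2)))).any id)).any id) =
      ((PySem.List.pyRange 0 (PySem.Str.len s - 1)).foldl (pvStep s)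
        (PySem.Dict.empty, false)).2 from by rw [Bool.eq_iff_iff, c1A_iff, c1B_iff]]
  rw [show (((PySem.List.pyRange 2 (PySem.Str.len s)).map (fun i =>
        PySem.Str.pyGet? s i == PySem.Str.pyGet? s (i - 2))).any id) =
      ((s.toList.zip (PySem.Str.slice s (some 2) none).toList).any
        (fun ab => ab.1 == ab.2)) from by rw [Bool.eq_iff_iff, c2A_iff, c2B_iff]]
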